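-- pv_equiv track=rewrite | github.com/zudljk/ganttoid | src/ganttoid/__init__.py | group_by_trade
-- ===== SOURCE A (Python) =====
-- def group_by_trade(tasks, trades):
--     grouped = {}
--     for key in tasks:
--         trade = trades[key]
--         if trade not in grouped:
--             grouped[trade] = []
--         grouped[trade].append(key)
--     return grouped
-- ===== SOURCE B (Python) =====
-- def group_by_trade(tasks, trades):
--     distinct = list(dict.fromkeys(trades[key] for key in tasks))
--     return {t: [key for key in tasks if trades[key] == t] for t in distinct}
-- ===== Notes on version B (the rewrite author's own statement) =====
-- stated objective: alternative
-- what changed: A builds the grouping in one accumulating pass that mutates a dict of lists; B first computes the ordered list of distinct trades, then builds each group by filtering the task keys for that trade.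
import Mathlib
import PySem

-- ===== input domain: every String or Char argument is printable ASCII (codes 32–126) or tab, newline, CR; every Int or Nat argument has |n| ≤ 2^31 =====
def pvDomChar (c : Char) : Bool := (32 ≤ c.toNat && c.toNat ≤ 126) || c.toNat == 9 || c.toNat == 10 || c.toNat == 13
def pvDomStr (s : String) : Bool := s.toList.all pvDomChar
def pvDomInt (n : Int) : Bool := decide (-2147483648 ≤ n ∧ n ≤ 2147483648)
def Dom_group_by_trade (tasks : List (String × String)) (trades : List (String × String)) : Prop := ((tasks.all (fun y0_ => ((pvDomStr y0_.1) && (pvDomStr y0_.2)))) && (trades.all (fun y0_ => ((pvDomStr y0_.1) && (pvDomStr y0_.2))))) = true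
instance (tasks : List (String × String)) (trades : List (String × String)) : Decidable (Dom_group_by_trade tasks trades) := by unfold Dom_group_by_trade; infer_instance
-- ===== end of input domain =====

-- B groups task keys by first building the ordered distinct-trade index, then filtering the keys per trade (alternative decomposition, same result; not claimed faster).


-- ===== PORT A =====
def group_by_trade (tasks : List (String × String)) (trades : List (String × String)) : List (String × List String) :=
  -- grouped = {}; for key in tasks: trade = trades[key]; if trade not in grouped: grouped[trade] = []; grouped[trade].append(key)
  -- trades[key] is ported as getD with a dummy default; Pre_ guarantees every key is present, so the default is never read.
  let td := PySem.Dict.ofList trades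
  let grouped := (PySem.Dict.ofList tasks).keys.foldl
    (fun grouped key =>
      let trade := td.getD key ""
      let grouped := if grouped.contains trade then grouped else grouped.insert trade ([] : List String)
      grouped.modify trade [] (fun g => g ++ [key]))
    PySem.Dict.empty
  grouped.items

-- ===== PORT B =====
def group_by_trade_alt (tasks : List (String × String)) (trades : List (String × String)) : List (String × List String) :=
  -- distinct = list(dict.fromkeys(trades[key] for key in tasks))
  -- return {t: [key for key in tasks if trades[key] == t] for t in distinct}
  let td := PySem.Dict.ofList trades
  let ks := (PySem.Dict.ofList tasks).keys
  let distinct := PySem.List.dedup (ks.map (fun key => td.getD key ""))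
  distinct.map (fun t => (t, ks.filter (fun key => td.getD key "" == t)))

-- ===== PRECONDITION & SPEC =====
-- Pre_ excludes exactly the inputs on which Python A raises KeyError: a task key missing from trades.
def Pre_group_by_trade (tasks : List (String × String)) (trades : List (String × String)) : Prop :=
  ∀ p ∈ tasks, p.1 ∈ trades.map Prod.fst
instance (tasks : List (String × String)) (trades : List (String × String)) : Decidable (Pre_group_by_trade tasks trades) := by unfold Pre_group_by_trade; infer_instance
def pvWitness_group_by_trade : (List (String × String)) × (List (String × String)) :=
  ([("t1", "dig"), ("t2", "wall"), ("t3", "wire")], [("t1", "mason"), ("t2", "mason"), ("t3", "electric")])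
def Spec_group_by_trade (tasks : List (String × String)) (trades : List (String × String)) (out : List (String × List String)) : Prop := out = group_by_trade_alt tasks trades
instance (tasks : List (String × String)) (trades : List (String × String)) (out : List (String × List String)) : Decidable (Spec_group_by_trade tasks trades out) := by unfold Spec_group_by_trade; infer_instance

-- ===== CLAIM (what is proved, stated in full; the proofs are below) =====
def Claim_equal_group_by_trade : Prop := ∀ (tasks : List (String × String)) (trades : List (String × String)), Dom_group_by_trade tasks trades → Pre_group_by_trade tasks trades → Spec_group_by_trade tasks trades (group_by_trade tasks trades)

-- ===== LEMMAS AND PROOFS =====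

-- the insert-if-absent followed by the append collapses to a plain modify (Python's setdefault-style pattern)
theorem gbt_insert_absent (g : PySem.Dict String (List String)) (t k : String) (h : g.contains t = false) :
    (g.insert t ([] : List String)).modify t [] (fun l => l ++ [k]) = g.modify t [] (fun l => l ++ [k]) := by
  obtain ⟨l⟩ := g
  have hgetl : (PySem.Dict.mk l).getD t ([] : List String) = [] :=
    PySem.Dict.getD_of_not_contains _ _ h
  simp only [PySem.Dict.contains_mk] at h
  have hnone : ∀ p ∈ l, (p.1 == t) = false := by
    intro p hp; exact Bool.eq_false_iff.mpr (List.any_eq_false.mp h p hp)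
  have hget : (PySem.Dict.mk (l ++ [(t, [])])).getD t ([] : List String) = [] := by
    simp only [PySem.Dict.getD, PySem.Dict.get?]
    rw [List.find?_append]
    have : List.find? (fun p => p.1 == t) l = none :=
      List.find?_eq_none.mpr (fun p hp => by simp [Bool.eq_false_iff.mp (hnone p hp)])
    simp [this]
  simp only [PySem.Dict.modify, PySem.Dict.insert, PySem.Dict.contains_mk, h, Bool.false_eq_true,
    ↓reduceIte, List.any_append, List.any_cons, BEq.rfl, Bool.or_true, List.any_nil, Bool.or_false]
  rw [hget, hgetl, List.map_append]
  rw [List.map_congr_left (fun p hp => by simp [hnone p hp] :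
    ∀ p ∈ l, (fun p => if (p.1 == t) = true then (t, ([] : List String) ++ [k]) else p) p = id p)]
  simp

theorem gbt_collapse (g : PySem.Dict String (List String)) (t k : String) :
    (if g.contains t then g else g.insert t ([] : List String)).modify t [] (fun l => l ++ [k])
      = g.modify t [] (fun l => l ++ [k]) := by
  by_cases h : g.contains t = true
  · simp [h]
  · simp only [Bool.not_eq_true] at h
    simp [h, gbt_insert_absent g t k h]

-- A's whole loop, with the collapse applied at every step
theorem gbt_foldl_collapse (td : PySem.Dict String String) (ks : List String)
    (g : PySem.Dict String (List String)) :
    ks.foldl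
      (fun grouped key =>
        let trade := td.getD key ""
        let grouped := if grouped.contains trade then grouped else grouped.insert trade ([] : List String)
        grouped.modify trade [] (fun l => l ++ [key])) g
    = ks.foldl (fun grouped key => grouped.modify (td.getD key "") [] (fun l => l ++ [key])) g := by
  induction ks generalizing g with
  | nil => rfl
  | cons k rest ih => simp only [List.foldl_cons, gbt_collapse]

-- the accumulated dict's items ARE the index-then-filter grouping B computes
theorem gbt_main (td : PySem.Dict String String) (ks : List String) :
    (ks.foldl (fun g key => g.modify (td.getD key "") [] (fun l => l ++ [key]))
        PySem.Dict.empty).items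
    = (PySem.List.dedup (ks.map (fun key => td.getD key ""))).map
        (fun t => (t, ks.filter (fun key => td.getD key "" == t))) := by
  set key := fun k => td.getD k ""
  have hfold : ks.foldl (fun g k => g.modify (key k) [] (fun l => l ++ [k])) PySem.Dict.empty
      = (ks.map (fun k => (key k, k))).foldl (fun d p => d.modify p.1 [] (fun l => l ++ [p.2])) PySem.Dict.empty := by
    rw [List.foldl_map]
  rw [hfold]
  set res := (ks.map (fun k => (key k, k))).foldl (fun d p => d.modify p.1 [] (fun l => l ++ [p.2])) PySem.Dict.empty with hres
  have hnd : res.keys.Nodup := by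
    rw [hres]
    exact PySem.Dict.nodup_keys_foldl_modify_key _ (fun (p : String × String) => p.1) _
      (fun d (p : String × String) => (fun l => l ++ [p.2])) _ (by simp [PySem.Dict.keys_empty])
  have hkeys : res.keys = PySem.List.dedup (ks.map key) := by
    rw [hres, PySem.Dict.keys_foldl_modify_key]
    simp only [PySem.Dict.keys_empty, List.map_map]
    show PySem.Set.update [] _ = _
    rfl
  have hget : ∀ c, res.getD c [] = ks.filter (fun k => key k == c) := by
    intro c
    rw [hres, PySem.Dict.getD_foldl_modify_append]
    simp only [List.filter_map, List.map_map, PySem.Dict.getD_empty, List.nil_append]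
    simp [Function.comp_def]
  rw [PySem.Dict.items_eq_map_keys res hnd [], hkeys]
  exact List.map_congr_left (fun t _ => by rw [hget t])

-- ===== VERDICT (by name: the statement is the Claim_ definition above) =====
theorem group_by_trade_spec : Claim_equal_group_by_trade := by
  intro tasks trades _ _
  show group_by_trade tasks trades = group_by_trade_alt tasks trades
  show (List.foldl
      (fun grouped key =>
        let trade := (PySem.Dict.ofList trades).getD key ""
        let grouped := if grouped.contains trade then grouped else grouped.insert trade ([] : List String)
        grouped.modify trade [] (fun l => l ++ [key]))
      PySem.Dict.empty (PySem.Dict.ofList tasks).keys).items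
    = (PySem.List.dedup (((PySem.Dict.ofList tasks).keys).map
        (fun key => (PySem.Dict.ofList trades).getD key ""))).map
        (fun t => (t, ((PySem.Dict.ofList tasks).keys).filter
          (fun key => (PySem.Dict.ofList trades).getD key "" == t)))
  rw [gbt_foldl_collapse]
  exact gbt_main (PySem.Dict.ofList trades) (PySem.Dict.ofList tasks).keys
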